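-- pv_equiv track=rewrite | github.com/gsandoo/problem-solving | python/live coding/문자열 압축기.py | solution
-- ===== SOURCE A (Python) =====
-- def solution(word):
--     from collections import Counter
--     answer = ""
--     a= Counter(word)
--
--     hs = set()
--     for w in word:
--         if w not in hs :
--             answer += w + str(a[w])
--             hs.add(w)
--
--     if len(word) < len(answer):
--         return word
--     return answer
-- ===== SOURCE B (Python) =====
-- def solution(word):
--     answer = ""
--     rest = word
--     while rest:
--         c = rest[0]
--         smaller = ''.join(ch for ch in rest if ch != c)
--         answer += c + str(len(rest) - len(smaller))
--         rest = smaller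
--     return word if len(word) < len(answer) else answer
-- ===== Notes on version B (the rewrite author's own statement) =====
-- stated objective: alternative
-- what changed: Replaces A's Counter table plus a seen-set-guarded rescan of word with a table-free repeated-partition loop: peel off the first character, obtain its count as the length drop after filtering it out, and continue on the filtered remainder.
import Mathlib
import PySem

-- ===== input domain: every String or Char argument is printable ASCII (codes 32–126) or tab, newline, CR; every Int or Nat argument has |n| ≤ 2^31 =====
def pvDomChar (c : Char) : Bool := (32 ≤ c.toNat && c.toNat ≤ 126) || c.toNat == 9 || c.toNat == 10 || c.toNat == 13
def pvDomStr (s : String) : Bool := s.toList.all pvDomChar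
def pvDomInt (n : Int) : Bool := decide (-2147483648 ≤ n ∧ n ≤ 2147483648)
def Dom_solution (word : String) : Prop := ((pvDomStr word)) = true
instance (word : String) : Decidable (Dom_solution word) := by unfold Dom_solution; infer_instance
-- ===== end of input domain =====

-- B replaces A's Counter table plus a seen-set-guarded rescan of word with a table-free
-- repeated-partition loop: peel off the first character, read its count off the length drop
-- after filtering it out, and continue on the filtered remainder; objective: alternative.

-- ===== PORT A =====
def solution (word : String) : String :=
  let a := PySem.Dict.counter word.toList
  let res := word.toList.foldl
    (fun (st : List Char × PySem.Set Char) w =>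
      if PySem.Set.contains st.2 w = false then
        (st.1 ++ (w :: (PySem.Int.toStr (a.getD w 0)).toList), PySem.Set.add st.2 w)
      else st)
    (([] : List Char), PySem.Set.empty)
  if PySem.Str.len word < (res.1.length : Int) then word else String.ofList res.1

-- ===== PORT B =====
-- the while loop of Source B: state (answer, rest); stops when rest is empty
def solutionAltLoop : List Char → List Char → List Char
  | acc, [] => acc
  | acc, c :: t =>
      let rest := c :: t
      let smaller := rest.filter (fun ch => ch != c)
      solutionAltLoop (acc ++ c :: (PySem.Int.toStr ((rest.length : Int) - (smaller.length : Int))).toList) smaller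
  termination_by _ r => r.length
  decreasing_by
    simp only [List.filter_cons, bne_self_eq_false, List.length_cons]
    exact Nat.lt_succ_of_le (List.length_filter_le _ _)

def solution_alt (word : String) : String :=
  let answer := solutionAltLoop [] word.toList
  if PySem.Str.len word < (answer.length : Int) then word else String.ofList answer

-- ===== PRECONDITION & SPEC =====
def Spec_solution (word : String) (out : String) : Prop := out = solution_alt word
instance (word : String) (out : String) : Decidable (Spec_solution word out) := by unfold Spec_solution; infer_instance

-- ===== CLAIM (what is proved, stated in full; the proofs are below) =====
def Claim_equal_solution : Prop := ∀ (word : String), Dom_solution word → Spec_solution word (solution word)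

-- ===== LEMMAS AND PROOFS =====

-- folding Set.add only appends: the start set is a prefix of the result
lemma foldl_add_prefix {α : Type} [BEq α] :
    ∀ (l : List α) (s : PySem.Set α), ∃ t, l.foldl PySem.Set.add s = s ++ t := by
  intro l
  induction l with
  | nil => intro s; exact ⟨[], by simp⟩
  | cons w l ih =>
    intro s
    simp only [List.foldl_cons]
    by_cases h : PySem.Set.contains s w = true
    · have heq : PySem.Set.add s w = s := by
        simp [PySem.Set.add, PySem.Set.contains] at *; exact h
      rw [heq]; exact ih s
    · have hadd : PySem.Set.add s w = s ++ [w] := by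
        have hb := eq_false_of_ne_true h
        simp [PySem.Set.add, PySem.Set.contains] at *; simp [hb]
      rw [hadd]
      obtain ⟨t, ht⟩ := ih (s ++ [w])
      exact ⟨[w] ++ t, by simpa using ht⟩

-- A's emit loop equals a fold of the new (previously unseen) elements, in first-occurrence order
lemma emit_loop {α : Type} [BEq α] (f : α → List Char) :
    ∀ (l : List α) (acc : List Char) (s : PySem.Set α),
      (l.foldl (fun (st : List Char × PySem.Set α) w =>
          if PySem.Set.contains st.2 w = false then (st.1 ++ f w, PySem.Set.add st.2 w) else st)
        (acc, s)).1
      = ((l.foldl PySem.Set.add s).drop s.length).foldl (fun a w => a ++ f w) acc := by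
  intro l
  induction l with
  | nil => intro acc s; simp
  | cons w l ih =>
    intro acc s
    simp only [List.foldl_cons]
    by_cases h : PySem.Set.contains s w = true
    · have hadd : PySem.Set.add s w = s := by
        simp [PySem.Set.add, PySem.Set.contains] at *; exact h
      rw [if_neg (by simp [show List.contains s w = true from h]), hadd]
      exact ih acc s
    · have hb : PySem.Set.contains s w = false := eq_false_of_ne_true h
      have hadd : PySem.Set.add s w = s ++ [w] := by
        simp [PySem.Set.add, PySem.Set.contains] at *; simp [hb]
      rw [if_pos hb, hadd]
      rw [ih (acc ++ f w) (s ++ [w])]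
      obtain ⟨t, ht⟩ := foldl_add_prefix l (s ++ [w])
      rw [ht]
      have h1 : ((s ++ [w]) ++ t).drop s.length = w :: t := by
        rw [List.append_assoc]; simp
      have h2 : ((s ++ [w]) ++ t).drop (s ++ [w]).length = t := List.drop_left
      rw [h1, h2]
      simp

-- set difference by one element is a filter
lemma discard_filter (s : PySem.Set Char) (c : Char) :
    PySem.Set.discard s c = s.filter (fun x => x != c) := by
  simp [PySem.Set.discard, bne]

-- dedup commutes with removing one character
lemma ofList_filter (c : Char) :
    ∀ (l : List Char),
      PySem.Set.ofList (l.filter (fun x => x != c))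
        = (PySem.Set.ofList l).filter (fun x => x != c) := by
  intro l
  induction l with
  | nil => rfl
  | cons x t ih =>
    by_cases hx : x = c
    · subst hx
      simp only [List.filter_cons, bne_self_eq_false, Bool.false_eq_true, if_false,
        PySem.Set.ofList_cons, discard_filter]
      rw [ih, List.filter_filter]
      simp
    · have hb : (x != c) = true := by simp [hx]
      simp only [List.filter_cons, hb, if_true, PySem.Set.ofList_cons, discard_filter]
      rw [ih]
      simp only [List.filter_filter]
      rw [List.filter_congr (fun a _ => Bool.and_comm (a != x) (a != c))]

-- the length drop after filtering out c is the number of occurrences of c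
lemma length_drop_count (l : List Char) (c : Char) :
    (l.length : Int) - ((l.filter (fun x => x != c)).length : Int) = (l.count c : Int) := by
  have h := List.length_eq_countP_add_countP (p := fun x => x == c) (l := l)
  have h2 : (l.filter (fun x => x != c)).length = l.countP (fun x => x != c) :=
    Eq.symm List.countP_eq_length_filter
  rw [List.count_eq_countP, h2]
  simp only [decide_not, bne, Bool.decide_eq_true] at *
  omega

-- B's loop is the fold of char+count over the distinct characters in first-occurrence order
lemma altLoop_eq :
    ∀ (n : Nat) (l : List Char), l.length ≤ n → ∀ (acc : List Char),
      solutionAltLoop acc l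
        = (PySem.Set.ofList l).foldl
            (fun a w => a ++ w :: (PySem.Int.toStr (l.count w : Int)).toList) acc := by
  intro n
  induction n with
  | zero =>
    intro l hl acc
    have : l = [] := List.eq_nil_of_length_eq_zero (Nat.le_zero.mp hl)
    subst this
    rw [solutionAltLoop, PySem.Set.ofList_nil, List.foldl_nil]
  | succ n ih =>
    intro l hl acc
    match l with
    | [] => rw [solutionAltLoop, PySem.Set.ofList_nil, List.foldl_nil]
    | c :: t =>
      have hsm : (c :: t).filter (fun ch => ch != c) = t.filter (fun ch => ch != c) := by
        simp
      have hlen : (t.filter (fun ch => ch != c)).length ≤ n := by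
        have := List.length_filter_le (fun ch => ch != c) t
        simp at hl; omega
      rw [show solutionAltLoop acc (c :: t)
            = solutionAltLoop
                (acc ++ c :: (PySem.Int.toStr (((c :: t).length : Int)
                    - (((c :: t).filter (fun ch => ch != c)).length : Int))).toList)
                ((c :: t).filter (fun ch => ch != c)) from by
          rw [solutionAltLoop]]
      rw [show ((c :: t).length : Int) - (((c :: t).filter (fun ch => ch != c)).length : Int)
            = ((c :: t).count c : Int) from length_drop_count (c :: t) c]
      rw [hsm, ih _ hlen]
      have hset : PySem.Set.ofList (t.filter (fun ch => ch != c))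
          = PySem.Set.discard (PySem.Set.ofList t) c := by
        have := ofList_filter c t
        rw [this, discard_filter]
      rw [hset]
      rw [PySem.Set.ofList_cons, List.foldl_cons]
      apply PySem.List.foldl_congr_mem
      intro a w hw
      have hwne : w ≠ c := by
        rw [discard_filter] at hw
        simpa using (List.of_mem_filter hw)
      have hcount : (t.filter (fun ch => ch != c)).count w = (c :: t).count w := by
        rw [List.count_filter (by simp [hwne])]
        simp [Ne.symm hwne]
      rw [hcount]

-- both emitted strings coincide
lemma answers_eq (l : List Char) :
    (l.foldl (fun (st : List Char × PySem.Set Char) w =>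
        if PySem.Set.contains st.2 w = false then
          (st.1 ++ (w :: (PySem.Int.toStr ((PySem.Dict.counter l).getD w 0)).toList),
           PySem.Set.add st.2 w)
        else st) (([] : List Char), PySem.Set.empty)).1
    = solutionAltLoop [] l := by
  rw [emit_loop (fun w => w :: (PySem.Int.toStr ((PySem.Dict.counter l).getD w 0)).toList) l []
      PySem.Set.empty]
  rw [altLoop_eq l.length l (le_refl _) []]
  simp only [PySem.Set.empty, List.length_nil, List.drop_zero, ← PySem.Set.ofList_eq_foldl]
  apply PySem.List.foldl_congr_mem
  intro a w _
  rw [PySem.Dict.getD_counter]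

-- ===== VERDICT (by name: the statement is the Claim_ definition above) =====
theorem solution_spec : Claim_equal_solution := by
  intro word _
  show solution word = solution_alt word
  unfold solution solution_alt
  dsimp only
  rw [answers_eq word.toList]
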